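-- pv_equiv track=rewrite | github.com/Mathuv/advent-of-code-2023 | day_02/solution.py | find_min_count_reqired_for_color_in_game
-- ===== SOURCE A (Python) =====
-- RED = "red"
--
-- GREEN = "green"
--
-- BLUE = "blue"
--
-- def find_min_count_reqired_for_color_in_game(reveals: list) -> dict:
--     """
--     Find max count reqired for color in game
--     """
--     min_count_map: dict = {
--         RED: 0,
--         GREEN: 0,
--         BLUE: 0,
--     }
--     for reveal in reveals:
--         if reveal.get(RED, 0) > min_count_map[RED]:
--             min_count_map[RED] = reveal[RED]
--         if reveal.get(GREEN, 0) > min_count_map[GREEN]: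
--             min_count_map[GREEN] = reveal[GREEN]
--         if reveal.get(BLUE, 0) > min_count_map[BLUE]:
--             min_count_map[BLUE] = reveal[BLUE]
--
--     # pprint(min_count_map)
--     return min_count_map
-- ===== SOURCE B (Python) =====
-- RED = "red"
--
-- GREEN = "green"
--
-- BLUE = "blue"
--
-- def find_min_count_reqired_for_color_in_game(reveals: list) -> dict:
--     """Divide-and-conquer: recursively split the reveal list in half and merge
--     the two sub-results with pointwise max (correct since max is associative
--     and commutative); the 0 floor is applied once at the top."""
--     def solve(part):
--         if not part:
--             return (0, 0, 0)
--         if len(part) == 1: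
--             r = part[0]
--             return (r.get(RED, 0), r.get(GREEN, 0), r.get(BLUE, 0))
--         mid = len(part) // 2
--         lr, lg, lb = solve(part[:mid])
--         rr, rg, rb = solve(part[mid:])
--         return (max(lr, rr), max(lg, rg), max(lb, rb))
--     r, g, b = solve(reveals)
--     return {RED: max(r, 0), GREEN: max(g, 0), BLUE: max(b, 0)}
-- ===== Notes on version B (the rewrite author's own statement) =====
-- stated objective: alternative
-- what changed: Replaces A's single linear pass mutating a shared dict via three guarded updates with a recursive divide-and-conquer tree reduction: the reveal list is split in half, sub-results are merged by pointwise max, and the 0 floor is applied once at the top.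
import Mathlib
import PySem

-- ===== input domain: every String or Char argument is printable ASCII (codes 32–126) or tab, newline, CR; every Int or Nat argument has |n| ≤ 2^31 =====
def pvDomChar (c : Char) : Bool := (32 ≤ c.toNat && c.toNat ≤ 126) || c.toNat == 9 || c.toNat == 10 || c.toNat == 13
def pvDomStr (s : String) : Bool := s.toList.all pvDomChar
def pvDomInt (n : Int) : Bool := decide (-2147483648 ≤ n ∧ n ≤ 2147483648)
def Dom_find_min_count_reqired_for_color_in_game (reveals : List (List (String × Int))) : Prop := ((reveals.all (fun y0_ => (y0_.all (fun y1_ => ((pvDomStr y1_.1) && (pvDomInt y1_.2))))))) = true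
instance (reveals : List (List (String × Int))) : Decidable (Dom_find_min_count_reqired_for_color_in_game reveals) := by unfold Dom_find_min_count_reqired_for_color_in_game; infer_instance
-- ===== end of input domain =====

-- B replaces A's single linear mutating pass with a recursive divide-and-conquer halving
-- reduction merged by pointwise max (alternative decomposition; same result).

-- ===== PORT A =====
-- one loop iteration of A's for-loop body (three guarded in-place dict updates)
-- Python `reveal[RED]` (a raising lookup) is ported as get?.getD 0: the guard
-- `reveal.get(RED,0) > min_count_map[RED] ≥ 0` guarantees the key is present there.
def pvStepA (m : PySem.Dict String Int) (reveal : PySem.Dict String Int) : PySem.Dict String Int :=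
  let m := if reveal.getD "red" 0 > m.getD "red" 0 then m.insert "red" ((reveal.get? "red").getD 0) else m
  let m := if reveal.getD "green" 0 > m.getD "green" 0 then m.insert "green" ((reveal.get? "green").getD 0) else m
  let m := if reveal.getD "blue" 0 > m.getD "blue" 0 then m.insert "blue" ((reveal.get? "blue").getD 0) else m
  m

def find_min_count_reqired_for_color_in_game (reveals : List (List (String × Int))) : List (String × Int) :=
  (reveals.foldl (fun m reveal => pvStepA m (PySem.Dict.mk reveal))
    (PySem.Dict.mk [("red", 0), ("green", 0), ("blue", 0)])).items

-- ===== PORT B =====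
-- leaf: (r.get(RED,0), r.get(GREEN,0), r.get(BLUE,0))
def pvLeafB (r : List (String × Int)) : Int × Int × Int :=
  ((PySem.Dict.mk r).getD "red" 0, (PySem.Dict.mk r).getD "green" 0, (PySem.Dict.mk r).getD "blue" 0)

-- solve(part): split at len//2, merge sub-results pointwise with max.
-- Structural recursion on a fuel = list length (the fuel only makes the
-- halving recursion total; the 0-fuel branch is unreachable since fuel ≥ length).
def pvSolveBF : Nat → List (List (String × Int)) → Int × Int × Int
  | _, [] => (0, 0, 0)
  | _, [r] => pvLeafB r
  | 0, _ => (0, 0, 0)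
  | fuel + 1, x :: y :: rest =>
      let mid := (x :: y :: rest).length / 2
      let a := pvSolveBF fuel ((x :: y :: rest).take mid)
      let b := pvSolveBF fuel ((x :: y :: rest).drop mid)
      (max a.1 b.1, max a.2.1 b.2.1, max a.2.2 b.2.2)

def pvSolveB (l : List (List (String × Int))) : Int × Int × Int := pvSolveBF l.length l

def find_min_count_reqired_for_color_in_game_alt (reveals : List (List (String × Int))) : List (String × Int) :=
  let t := pvSolveB reveals
  [("red", max t.1 0), ("green", max t.2.1 0), ("blue", max t.2.2 0)]

-- ===== PRECONDITION & SPEC =====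
def Spec_find_min_count_reqired_for_color_in_game (reveals : List (List (String × Int))) (out : List (String × Int)) : Prop := out = find_min_count_reqired_for_color_in_game_alt reveals
instance (reveals : List (List (String × Int))) (out : List (String × Int)) : Decidable (Spec_find_min_count_reqired_for_color_in_game reveals out) := by unfold Spec_find_min_count_reqired_for_color_in_game; infer_instance

-- ===== CLAIM =====
def Claim_equal_find_min_count_reqired_for_color_in_game : Prop := ∀ (reveals : List (List (String × Int))), Dom_find_min_count_reqired_for_color_in_game reveals → Spec_find_min_count_reqired_for_color_in_game reveals (find_min_count_reqired_for_color_in_game reveals)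

-- ===== LEMMAS AND PROOFS =====

-- A's loop state is always the 3-entry dict in fixed order; each iteration maxes each slot.
lemma pvStepA_mk (a b c : Int) (r : PySem.Dict String Int) :
    pvStepA (PySem.Dict.mk [("red", a), ("green", b), ("blue", c)]) r =
      PySem.Dict.mk [("red", max a (r.getD "red" 0)),
                     ("green", max b (r.getD "green" 0)),
                     ("blue", max c (r.getD "blue" 0))] := by
  simp only [pvStepA, PySem.Dict.getD_eq_get?_getD]
  apply PySem.Dict.ext
  split_ifs with h1 h2 h3 h2 h3 h3 h3 <;>
    simp_all [PySem.Dict.insert, PySem.Dict.get?, max_def] <;> omega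

-- the whole fold keeps that shape, with each slot a running max
lemma pvFoldA (reveals : List (List (String × Int))) (a b c : Int) :
    reveals.foldl (fun m reveal => pvStepA m (PySem.Dict.mk reveal))
      (PySem.Dict.mk [("red", a), ("green", b), ("blue", c)]) =
    PySem.Dict.mk
      [("red", (reveals.map (fun r => (PySem.Dict.mk r).getD "red" 0)).foldl max a),
       ("green", (reveals.map (fun r => (PySem.Dict.mk r).getD "green" 0)).foldl max b),
       ("blue", (reveals.map (fun r => (PySem.Dict.mk r).getD "blue" 0)).foldl max c)] := by
  induction reveals generalizing a b c with
  | nil => simp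
  | cons r rs ih => simp [pvStepA_mk, ih]

-- foldl max pulls a max out of its seed
lemma pvFoldlMaxSeed (xs : List Int) (x y : Int) :
    xs.foldl max (max x y) = max x (xs.foldl max y) := by
  induction xs generalizing y with
  | nil => rfl
  | cons a xs ih => simp only [List.foldl_cons, max_assoc, ih]

lemma pvFoldlMaxNonneg (xs : List Int) : 0 ≤ xs.foldl max 0 := by
  have h := pvFoldlMaxSeed xs 0 0
  simp only [max_self] at h
  omega

-- fold max 0 over an append splits into a max of the two folds
lemma pvFoldlMaxAppend (xs ys : List Int) :
    (xs ++ ys).foldl max 0 = max (xs.foldl max 0) (ys.foldl max 0) := by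
  have hx := pvFoldlMaxNonneg xs
  calc (xs ++ ys).foldl max 0 = ys.foldl max (xs.foldl max 0) := List.foldl_append ..
    _ = ys.foldl max (max (xs.foldl max 0) 0) := by rw [max_eq_left hx]
    _ = max (xs.foldl max 0) (ys.foldl max 0) := pvFoldlMaxSeed ..

-- B's tree reduction, floored at 0, equals the linear fold max 0 per color
lemma pvSolveBF_chars (fuel : Nat) (l : List (List (String × Int))) (hf : l.length ≤ fuel) :
    max (pvSolveBF fuel l).1 0 = (l.map (fun r => (PySem.Dict.mk r).getD "red" 0)).foldl max 0 ∧
    max (pvSolveBF fuel l).2.1 0 = (l.map (fun r => (PySem.Dict.mk r).getD "green" 0)).foldl max 0 ∧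
    max (pvSolveBF fuel l).2.2 0 = (l.map (fun r => (PySem.Dict.mk r).getD "blue" 0)).foldl max 0 := by
  induction fuel generalizing l with
  | zero =>
      have : l = [] := by cases l with
        | nil => rfl
        | cons a t => simp at hf
      subst this; simp [pvSolveBF]
  | succ fuel ih =>
      cases l with
      | nil => simp [pvSolveBF]
      | cons x t =>
        cases t with
        | nil => simp [pvSolveBF, pvLeafB, max_comm]
        | cons y rest =>
          have hta : ((x :: y :: rest).take ((x :: y :: rest).length / 2)).length ≤ fuel := by
            simp only [List.length_take, List.length_cons] at *; omega
          have htb : ((x :: y :: rest).drop ((x :: y :: rest).length / 2)).length ≤ fuel := by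
            simp only [List.length_drop, List.length_cons] at *; omega
          have iha := ih _ hta
          have ihb := ih _ htb
          have hsplit : x :: y :: rest =
              (x :: y :: rest).take ((x :: y :: rest).length / 2) ++
              (x :: y :: rest).drop ((x :: y :: rest).length / 2) :=
            (List.take_append_drop _ _).symm
          rw [pvSolveBF]
          refine ⟨?_, ?_, ?_⟩
          · conv_rhs => rw [hsplit]
            rw [List.map_append, pvFoldlMaxAppend, ← iha.1, ← ihb.1]
            simp [max_comm, max_left_comm]
          · conv_rhs => rw [hsplit]
            rw [List.map_append, pvFoldlMaxAppend, ← iha.2.1, ← ihb.2.1]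
            simp [max_comm, max_left_comm]
          · conv_rhs => rw [hsplit]
            rw [List.map_append, pvFoldlMaxAppend, ← iha.2.2, ← ihb.2.2]
            simp [max_comm, max_left_comm]

lemma pvSolveB_chars (l : List (List (String × Int))) :
    max (pvSolveB l).1 0 = (l.map (fun r => (PySem.Dict.mk r).getD "red" 0)).foldl max 0 ∧
    max (pvSolveB l).2.1 0 = (l.map (fun r => (PySem.Dict.mk r).getD "green" 0)).foldl max 0 ∧
    max (pvSolveB l).2.2 0 = (l.map (fun r => (PySem.Dict.mk r).getD "blue" 0)).foldl max 0 :=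
  pvSolveBF_chars l.length l le_rfl

-- ===== VERDICT =====
theorem find_min_count_reqired_for_color_in_game_spec : Claim_equal_find_min_count_reqired_for_color_in_game := by
  intro reveals _
  show _ = _
  have h := pvSolveB_chars reveals
  simp [find_min_count_reqired_for_color_in_game, find_min_count_reqired_for_color_in_game_alt,
    pvFoldA, ← h.1, ← h.2.1, ← h.2.2]
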